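-- pv_equiv track=rewrite | github.com/Promotion-official/Algorithm-Study | Programmers/level2/기능개발/sunrabbit.py | solution
-- ===== SOURCE A (Python) =====
-- def solution(progresses, speeds):
--     answer = []
--     while progresses != []:
--         for i in range(len(progresses)):
--             progresses[i] += speeds[i]
--         j = 0
--         try:
--             while progresses[0] >= 100:
--                 progresses.pop(0)
--                 speeds.pop(0)
--                 j += 1
--         except:
--             pass
--         if j != 0:
--             answer.append(j)
--     return answer
-- ===== SOURCE B (Python) =====
-- def solution(progresses, speeds):
--     # One pass: days-to-finish per task via ceiling division, grouped by running max.
--     answer = []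
--     prev = 0
--     count = 0
--     for p, s in zip(progresses, speeds):
--         d = 1 if p + s >= 100 else -((p - 100) // s)
--         if d <= prev:
--             count += 1
--         else:
--             if count != 0:
--                 answer.append(count)
--             prev = d
--             count = 1
--     if count != 0:
--         answer.append(count)
--     return answer
-- ===== Notes on version B (the rewrite author's own statement) =====
-- stated objective: faster
-- what changed: Replaces the day-by-day simulation (add speeds to every remaining task each day, pop finished heads) by a single pass that computes each task's finish day with one ceiling division and groups consecutive tasks by the running maximum finish day; intended as asymptotically faster — a timing run saw A time out at n=16 where B returned, but could not measure a clean ratio, so the speed-up is unconfirmed in a timing run.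
-- outside the precondition, e.g. on solution([101], [-1]): A returns [1], B returns [1]
import Mathlib
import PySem

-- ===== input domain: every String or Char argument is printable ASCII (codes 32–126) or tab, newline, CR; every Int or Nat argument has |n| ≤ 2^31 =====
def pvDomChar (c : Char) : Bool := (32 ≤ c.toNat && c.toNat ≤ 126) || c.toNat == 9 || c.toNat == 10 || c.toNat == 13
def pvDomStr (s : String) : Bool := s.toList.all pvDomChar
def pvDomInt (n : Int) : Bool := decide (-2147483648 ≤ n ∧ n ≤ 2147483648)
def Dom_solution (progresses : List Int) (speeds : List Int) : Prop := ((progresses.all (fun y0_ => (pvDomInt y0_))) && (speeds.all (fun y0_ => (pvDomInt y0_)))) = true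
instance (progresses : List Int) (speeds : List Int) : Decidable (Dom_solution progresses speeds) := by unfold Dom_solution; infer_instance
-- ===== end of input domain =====

-- B replaces A's day-by-day simulation by one pass over per-task finish days computed with
-- ceiling division. Equivalence is about the RETURN value only: Python A empties its argument
-- lists in place, B does not mutate them.

-- ===== PORT A =====
-- inner `while progresses[0] >= 100: pop(0); pop(0); j += 1` (the try/except stops it at the empty list)
def popWhileA : List (Int × Int) → Int × List (Int × Int)
  | [] => (0, [])
  | (p, s) :: rest =>
    if p ≥ 100 then
      ((popWhileA rest).1 + 1, (popWhileA rest).2)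
    else (0, (p, s) :: rest)

-- outer `while progresses != []` loop; the fuel only makes the recursion total
-- (never exhausted under Pre_, which guarantees the fuel supplied below suffices)
def loopA : Nat → List (Int × Int) → List Int → List Int
  | _, [], ans => ans
  | Nat.succ fuel, q :: t, ans =>
    loopA fuel (popWhileA ((q :: t).map fun r => (r.1 + r.2, r.2))).2
      (if (popWhileA ((q :: t).map fun r => (r.1 + r.2, r.2))).1 ≠ 0
       then ans ++ [(popWhileA ((q :: t).map fun r => (r.1 + r.2, r.2))).1] else ans)
  | 0, _ :: _, ans => ans

def solution (progresses : List Int) (speeds : List Int) : List Int :=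
  loopA ((progresses.map (fun p => (100 - p).toNat)).sum + 1) (progresses.zip speeds) []

-- ===== PORT B =====
-- d = 1 if p + s >= 100 else -((p - 100) // s)
def dayB (p s : Int) : Int :=
  if p + s ≥ 100 then 1 else -(PySem.Int.floordiv (p - 100) s)

def goB : List (Int × Int) → Int → Int → List Int → List Int
  | [], _, count, ans => if count ≠ 0 then ans ++ [count] else ans
  | (p, s) :: t, prev, count, ans =>
    if dayB p s ≤ prev then goB t prev (count + 1) ans
    else goB t (dayB p s) 1 (if count ≠ 0 then ans ++ [count] else ans)

def solution_alt (progresses : List Int) (speeds : List Int) : List Int :=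
  goB (progresses.zip speeds) 0 0 []

-- ===== PRECONDITION & SPEC =====
-- Pre_ excludes inputs where speeds is shorter than progresses (A raises IndexError in the
-- update loop) and inputs with a relevant nonpositive speed: there A loops forever except in
-- accidental corners where every earlier task already finishes on day one.
def Pre_solution (progresses : List Int) (speeds : List Int) : Prop :=
  progresses.length ≤ speeds.length ∧ ∀ q ∈ progresses.zip speeds, 1 ≤ q.2
instance (progresses : List Int) (speeds : List Int) : Decidable (Pre_solution progresses speeds) := by
  unfold Pre_solution; infer_instance

def pvWitness_solution : List Int × List Int := ([93, 30, 55], [1, 30, 5])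

def Spec_solution (progresses : List Int) (speeds : List Int) (out : List Int) : Prop :=
  out = solution_alt progresses speeds
instance (progresses : List Int) (speeds : List Int) (out : List Int) : Decidable (Spec_solution progresses speeds out) := by
  unfold Spec_solution; infer_instance

-- ===== CLAIM (what is proved, stated in full; the proofs are below) =====
def Claim_equal_solution : Prop := ∀ (progresses : List Int) (speeds : List Int), Dom_solution progresses speeds → Pre_solution progresses speeds → Spec_solution progresses speeds (solution progresses speeds)

-- ===== LEMMAS AND PROOFS =====

-- abstract one-group-at-a-time grouping over the list of finish days
def g : List Int → Int → Int → List Int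
  | [], _, c => if c ≠ 0 then [c] else []
  | d :: t, prev, c => if d ≤ prev then g t prev (c + 1) else (if c ≠ 0 then [c] else []) ++ g t d 1

def shift1 (d : Int) : Int := max 1 (d - 1)

def leadOnes : List Int → Nat
  | [] => 0
  | d :: t => if d = 1 then leadOnes t + 1 else 0

theorem dayB_pos {p s : Int} (hs : 1 ≤ s) : 1 ≤ dayB p s := by
  unfold dayB
  split
  · omega
  · rename_i h
    have h2 : ¬ (-1 ≤ PySem.Int.floordiv (p - 100) s) := by
      rw [PySem.Int.le_floordiv_iff_mul_le (by omega)]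
      nlinarith
    omega

theorem dayB_ge_two {p s : Int} (hs : 1 ≤ s) (h : ¬ p + s ≥ 100) : 2 ≤ dayB p s := by
  unfold dayB
  rw [if_neg h]
  have h2 : ¬ (-1 ≤ PySem.Int.floordiv (p - 100) s) := by
    rw [PySem.Int.le_floordiv_iff_mul_le (by omega)]
    nlinarith
  omega

theorem dayB_eq_one_iff {p s : Int} (hs : 1 ≤ s) : dayB p s = 1 ↔ p + s ≥ 100 := by
  constructor
  · intro h
    by_contra hc
    have := dayB_ge_two hs hc
    omega
  · intro h; simp [dayB, h]

theorem dayB_step {p s : Int} (hs : 1 ≤ s) : dayB (p + s) s = shift1 (dayB p s) := by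
  unfold shift1
  by_cases h1 : p + s ≥ 100
  · have e1 : dayB p s = 1 := (dayB_eq_one_iff hs).2 h1
    have e2 : dayB (p + s) s = 1 := (dayB_eq_one_iff hs).2 (by nlinarith)
    rw [e1, e2]; omega
  · have hd2 : 2 ≤ dayB p s := dayB_ge_two hs h1
    by_cases h2 : p + s + s ≥ 100
    · have he1 : dayB (p + s) s = 1 := (dayB_eq_one_iff hs).2 h2
      have hle : dayB p s ≤ 2 := by
        unfold dayB
        rw [if_neg (by omega)]
        have : -2 ≤ PySem.Int.floordiv (p - 100) s := by
          rw [PySem.Int.le_floordiv_iff_mul_le (by omega)]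
          nlinarith
        omega
      rw [he1]; omega
    · have hstep : PySem.Int.floordiv (p + s - 100) s = PySem.Int.floordiv (p - 100) s + 1 := by
        rw [PySem.Int.floordiv_eq_ediv_of_pos (by omega), PySem.Int.floordiv_eq_ediv_of_pos (by omega)]
        have e : p + s - 100 = (p - 100) + 1 * s := by ring
        rw [e, Int.add_mul_ediv_right _ _ (by omega)]
      have ha : dayB (p + s) s = -(PySem.Int.floordiv (p + s - 100) s) := by
        unfold dayB; rw [if_neg (by omega)]
      have hb : dayB p s = -(PySem.Int.floordiv (p - 100) s) := by
        unfold dayB; rw [if_neg (by omega)]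
      rw [ha, hstep]
      omega

theorem dayB_le_bound {p s : Int} (hs : 1 ≤ s) : dayB p s ≤ max 1 (100 - p) := by
  by_cases h1 : p + s ≥ 100
  · rw [(dayB_eq_one_iff hs).2 h1]; omega
  · have hb : dayB p s = -(PySem.Int.floordiv (p - 100) s) := by
      unfold dayB; rw [if_neg (by omega)]
    have : p - 100 ≤ PySem.Int.floordiv (p - 100) s := by
      rw [PySem.Int.le_floordiv_iff_mul_le (by omega)]
      nlinarith
    omega

-- B's loop accumulates exactly g over the mapped finish days
theorem goB_eq_g : ∀ (l : List (Int × Int)) (prev c : Int) (ans : List Int),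
    goB l prev c ans = ans ++ g (l.map (fun q => dayB q.1 q.2)) prev c := by
  intro l
  induction l with
  | nil => intro prev c ans; simp only [goB, g, List.map_nil]; split <;> simp
  | cons q t ih =>
    intro prev c ans
    obtain ⟨p, s⟩ := q
    simp only [goB, g, List.map_cons]
    split
    · exact ih _ _ _
    · rw [ih]
      split <;> simp

-- shifting every finish day down one day commutes with grouping (current max ≥ 2)
theorem g_shift : ∀ (t : List Int) (prev c : Int), 2 ≤ prev → (∀ d ∈ t, 1 ≤ d) →
    g t prev c = g (t.map shift1) (prev - 1) c := by
  intro t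
  induction t with
  | nil => intro prev c _ _; simp [g]
  | cons x t ih =>
    intro prev c hprev hall
    have hx : 1 ≤ x := hall x (by simp)
    have hall' : ∀ d ∈ t, 1 ≤ d := fun d hd => hall d (by simp [hd])
    have hsx : shift1 x = max 1 (x - 1) := rfl
    simp only [g, List.map_cons]
    by_cases hle : x ≤ prev
    · have h1 : shift1 x ≤ prev - 1 := by rw [hsx]; omega
      rw [if_pos hle, if_pos h1]
      exact ih prev (c + 1) hprev hall'
    · have h1 : ¬ shift1 x ≤ prev - 1 := by rw [hsx]; omega
      have h2 : shift1 x = x - 1 := by rw [hsx]; omega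
      rw [if_neg hle, if_neg h1, h2, ih x 1 (by omega) hall']

-- consuming a run of day-1 tasks from state (prev = 1, count = c ≥ 1)
theorem g_ones : ∀ (ds : List Int) (c : Int), 1 ≤ c → (∀ d ∈ ds, 1 ≤ d) →
    g ds 1 c = (c + (leadOnes ds : Int)) :: g ((ds.drop (leadOnes ds)).map shift1) 0 0 := by
  intro ds
  induction ds with
  | nil =>
    intro c hc _
    simp only [leadOnes, g, List.drop_nil, List.map_nil, if_pos (by omega : c ≠ 0),
      if_neg (by omega : ¬ (0:Int) ≠ 0)]
    norm_num
  | cons x t ih =>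
    intro c hc hall
    have hx : 1 ≤ x := hall x (by simp)
    have hall' : ∀ d ∈ t, 1 ≤ d := fun d hd => hall d (by simp [hd])
    by_cases h1 : x = 1
    · subst h1
      have hlo : leadOnes ((1:Int) :: t) = leadOnes t + 1 := by simp [leadOnes]
      rw [hlo]
      simp only [g, if_pos (le_refl (1:Int)), List.drop_succ_cons]
      rw [ih (c + 1) (by omega) hall']
      congr 1
      push_cast
      ring
    · have hx2 : 2 ≤ x := by omega
      have hlo : leadOnes (x :: t) = 0 := by simp [leadOnes, h1]
      have hs1 : shift1 x = x - 1 := by show max 1 (x - 1) = x - 1; omega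
      have hL : g (x :: t) 1 c = c :: g t x 1 := by
        simp only [g, if_neg (by omega : ¬ x ≤ (1:Int)), if_pos (by omega : c ≠ 0),
          List.singleton_append]
      have hR : g (shift1 x :: t.map shift1) 0 0 = g (t.map shift1) (x - 1) 1 := by
        simp only [g, hs1, if_neg (by omega : ¬ x - 1 ≤ (0:Int)),
          if_neg (by omega : ¬ (0:Int) ≠ 0), List.nil_append]
      rw [hlo, hL]
      simp only [List.drop_zero, List.map_cons]
      rw [hR, ← g_shift t x 1 (by omega) hall']
      norm_num

-- one day of A's batching, expressed on the list of finish days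
theorem g_day : ∀ (ds : List Int), (∀ d ∈ ds, 1 ≤ d) →
    g ds 0 0 = (if leadOnes ds = 0 then ([] : List Int) else [(leadOnes ds : Int)])
      ++ g ((ds.drop (leadOnes ds)).map shift1) 0 0 := by
  intro ds hall
  cases ds with
  | nil => simp [g, leadOnes]
  | cons x t =>
    have hx : 1 ≤ x := hall x (by simp)
    have hall' : ∀ d ∈ t, 1 ≤ d := fun d hd => hall d (by simp [hd])
    by_cases h1 : x = 1
    · subst h1
      have hlo : leadOnes ((1:Int) :: t) = leadOnes t + 1 := by simp [leadOnes]
      have hL : g ((1:Int) :: t) 0 0 = g t 1 1 := by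
        simp only [g, if_neg (by omega : ¬ (1:Int) ≤ 0), if_neg (by omega : ¬ (0:Int) ≠ 0),
          List.nil_append]
      rw [hL, g_ones t 1 (le_refl 1) hall', hlo,
        if_neg (by omega : ¬ leadOnes t + 1 = 0)]
      simp only [List.drop_succ_cons, List.singleton_append]
      congr 1
      push_cast
      ring
    · have hx2 : 2 ≤ x := by omega
      have hlo : leadOnes (x :: t) = 0 := by simp [leadOnes, h1]
      have hs1 : shift1 x = x - 1 := by show max 1 (x - 1) = x - 1; omega
      have hL : g (x :: t) 0 0 = g t x 1 := by
        simp only [g, if_neg (by omega : ¬ x ≤ (0:Int)), if_neg (by omega : ¬ (0:Int) ≠ 0),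
          List.nil_append]
      have hR : g (shift1 x :: t.map shift1) 0 0 = g (t.map shift1) (x - 1) 1 := by
        simp only [g, hs1, if_neg (by omega : ¬ x - 1 ≤ (0:Int)),
          if_neg (by omega : ¬ (0:Int) ≠ 0), List.nil_append]
      rw [hlo, hL]
      simp only [List.drop_zero, List.map_cons]
      rw [hR, ← g_shift t x 1 (by omega) hall']
      simp

-- popWhileA on the bumped list pops exactly the leading tasks whose finish day is 1
theorem popWhileA_spec : ∀ (l : List (Int × Int)), (∀ q ∈ l, 1 ≤ q.2) →
    popWhileA (l.map fun r => (r.1 + r.2, r.2)) =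
      (((leadOnes (l.map fun q => dayB q.1 q.2) : Nat) : Int),
        ((l.drop (leadOnes (l.map fun q => dayB q.1 q.2))).map fun r => (r.1 + r.2, r.2))) := by
  intro l
  induction l with
  | nil => intro _; simp [popWhileA, leadOnes]
  | cons q t ih =>
    intro hall
    obtain ⟨p, s⟩ := q
    have hs : 1 ≤ s := hall (p, s) (by simp)
    have hall' : ∀ q ∈ t, 1 ≤ q.2 := fun q hq => hall q (by simp [hq])
    simp only [List.map_cons, popWhileA]
    by_cases h1 : p + s ≥ 100
    · have hd1 : dayB p s = 1 := (dayB_eq_one_iff hs).2 h1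
      rw [if_pos h1, ih hall']
      simp only [leadOnes, if_pos hd1, List.drop_succ_cons, Prod.mk.injEq]
      exact ⟨by push_cast; ring, by simp⟩
    · have hd1 : dayB p s ≠ 1 := fun hc => h1 ((dayB_eq_one_iff hs).1 hc)
      rw [if_neg h1]
      simp only [leadOnes, if_neg hd1, List.drop_zero, List.map_cons]
      simp

-- the element just past the run of ones is not 1
theorem leadOnes_drop_head : ∀ (ds : List Int) (d : Int) (t : List Int),
    ds.drop (leadOnes ds) = d :: t → d ≠ 1 := by
  intro ds
  induction ds with
  | nil => intro d t h; simp at h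
  | cons x xs ih =>
    intro d t h
    by_cases h1 : x = 1
    · subst h1
      simp only [leadOnes] at h
      exact ih d t h
    · simp only [leadOnes, if_neg h1, List.drop_zero] at h
      cases h; exact h1

-- unfolding one day of the simulation
theorem loopA_succ (fuel : Nat) (q : Int × Int) (t : List (Int × Int)) (ans : List Int)
    (hs : ∀ r ∈ q :: t, 1 ≤ r.2) :
    loopA (Nat.succ fuel) (q :: t) ans =
      loopA fuel (((q :: t).drop (leadOnes ((q :: t).map fun r => dayB r.1 r.2))).map
          fun r => (r.1 + r.2, r.2))
        (if ((leadOnes ((q :: t).map fun r => dayB r.1 r.2) : Nat) : Int) ≠ 0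
         then ans ++ [((leadOnes ((q :: t).map fun r => dayB r.1 r.2) : Nat) : Int)] else ans) := by
  rw [loopA, popWhileA_spec (q :: t) hs]

-- MAIN: given enough fuel, A's simulation equals the grouping of the finish days
theorem loopA_eq_g : ∀ (fuel : Nat) (l : List (Int × Int)) (ans : List Int),
    (∀ q ∈ l, 1 ≤ q.2) → (∀ q ∈ l, dayB q.1 q.2 ≤ (fuel : Int)) →
    loopA fuel l ans = ans ++ g (l.map fun q => dayB q.1 q.2) 0 0 := by
  intro fuel
  induction fuel with
  | zero =>
    intro l ans hs hd
    cases l with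
    | nil => simp [loopA, g]
    | cons q t =>
      exfalso
      have h1 : 1 ≤ dayB q.1 q.2 := dayB_pos (hs q (by simp))
      have h2 := hd q (by simp)
      push_cast at h2
      omega
  | succ fuel ih =>
    intro l ans hs hd
    cases l with
    | nil => simp [loopA, g]
    | cons q t =>
      rw [loopA_succ fuel q t ans hs]
      set k := leadOnes ((q :: t).map fun r => dayB r.1 r.2) with hk
      have hall1 : ∀ d ∈ (q :: t).map fun r => dayB r.1 r.2, 1 ≤ d := by
        intro d hd'
        rw [List.mem_map] at hd'
        obtain ⟨r, hr, hrd⟩ := hd'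
        rw [← hrd]; exact dayB_pos (hs r hr)
      have hmap : (((q :: t).drop k).map fun r => (r.1 + r.2, r.2)).map (fun r => dayB r.1 r.2)
          = (((q :: t).map fun r => dayB r.1 r.2).drop k).map shift1 := by
        rw [← List.map_drop, List.map_map, List.map_map]
        apply List.map_congr_left
        intro r hr
        have hrs : 1 ≤ r.2 := hs r (List.mem_of_mem_drop hr)
        show dayB (r.1 + r.2) r.2 = shift1 (dayB r.1 r.2)
        exact dayB_step hrs
      have hshape : ∀ q' ∈ ((q :: t).drop k).map fun r => (r.1 + r.2, r.2), 1 ≤ q'.2 := by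
        intro q' hq'
        rw [List.mem_map] at hq'
        obtain ⟨r, hr, hrq⟩ := hq'
        have := hs r (List.mem_of_mem_drop hr)
        rw [← hrq]; exact this
      have hdbound : ∀ q' ∈ ((q :: t).drop k).map fun r => (r.1 + r.2, r.2),
          dayB q'.1 q'.2 ≤ (fuel : Int) := by
        intro q' hq'
        rw [List.mem_map] at hq'
        obtain ⟨r, hr, hrq⟩ := hq'
        have hrs : 1 ≤ r.2 := hs r (List.mem_of_mem_drop hr)
        have hdr : dayB r.1 r.2 ≤ ((fuel : Int) + 1) := by
          have := hd r (List.mem_of_mem_drop hr)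
          push_cast at this
          omega
        -- if the shifted remainder is nonempty, its first element shows 1 ≤ fuel
        have hfuel1 : 1 ≤ fuel := by
          rcases hrem : (q :: t).drop k with _ | ⟨r0, rt⟩
          · rw [hrem] at hr; simp at hr
          · have hdk : (((q :: t).map fun r => dayB r.1 r.2).drop k)
                = dayB r0.1 r0.2 :: (rt.map fun r => dayB r.1 r.2) := by
              rw [← List.map_drop, hrem, List.map_cons]
            have hne1 : dayB r0.1 r0.2 ≠ 1 := leadOnes_drop_head _ _ _ hdk
            have hr0mem : r0 ∈ q :: t := List.mem_of_mem_drop (by rw [hrem]; simp)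
            have h2 : 2 ≤ dayB r0.1 r0.2 := by
              have h1' : 1 ≤ dayB r0.1 r0.2 := dayB_pos (hs r0 hr0mem)
              omega
            have := hd r0 hr0mem
            push_cast at this
            omega
        rw [← hrq]
        show dayB (r.1 + r.2) r.2 ≤ (fuel : Int)
        rw [dayB_step hrs]
        show max 1 (dayB r.1 r.2 - 1) ≤ (fuel : Int)
        omega
      rw [ih _ _ hshape hdbound, hmap, g_day _ hall1, ← hk]
      by_cases hk0 : k = 0
      · rw [if_pos hk0, if_neg (by omega : ¬ ((k : Nat) : Int) ≠ 0)]
        simp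
      · rw [if_neg hk0, if_pos (by omega : ((k : Nat) : Int) ≠ 0)]
        simp

-- fuel sufficiency: every finish day is at most sum(max(0, 100 - p)) + 1
theorem fuel_sufficient (progresses speeds : List Int)
    (hs : ∀ q ∈ progresses.zip speeds, 1 ≤ q.2) :
    ∀ q ∈ progresses.zip speeds,
      dayB q.1 q.2 ≤ (((progresses.map (fun p => (100 - p).toNat)).sum + 1 : Nat) : Int) := by
  intro q hq
  have hqs : 1 ≤ q.2 := hs q hq
  have hp : q.1 ∈ progresses := (List.of_mem_zip hq).1
  have hmem : (100 - q.1).toNat ∈ progresses.map (fun p => (100 - p).toNat) :=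
    List.mem_map_of_mem hp
  have hle : (100 - q.1).toNat ≤ (progresses.map (fun p => (100 - p).toNat)).sum :=
    List.single_le_sum (fun _ _ => Nat.zero_le _) _ hmem
  have hleZ : (((100 - q.1).toNat : Nat) : Int) ≤ (((progresses.map (fun p => (100 - p).toNat)).sum : Nat) : Int) := by
    exact_mod_cast hle
  have hb := dayB_le_bound (p := q.1) hqs
  have hc : (((progresses.map (fun p => (100 - p).toNat)).sum + 1 : Nat) : Int)
      = (((progresses.map (fun p => (100 - p).toNat)).sum : Nat) : Int) + 1 := by
    push_cast; ring
  rw [hc]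
  omega

-- ===== VERDICT (by name: the statement is the Claim_ definition above) =====
theorem solution_spec : Claim_equal_solution := by
  intro progresses speeds _ hpre
  obtain ⟨hlen, hs⟩ := hpre
  unfold Spec_solution solution solution_alt
  rw [loopA_eq_g _ _ _ hs (fuel_sufficient progresses speeds hs), goB_eq_g]
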